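-- pv_equiv track=rewrite | github.com/ilialecha/Programming_2 | Lab-5/gc_content.py | longest_gc_neutral2
-- ===== SOURCE A (Python) =====
-- def gc_neutral2(S):
--     n = len(S)
--     if n%2!=0:return False
--     else: return rec_gc_content(S,0,n-1) == n // 2
--
-- def rec_gc_content(S,low,high):
--     if low>high:return 0
--     elif S[low] == 'C' or S[low]=='G':
--         return 1 + rec_gc_content(S,low+1,high)
--     else:
--         return 0 + rec_gc_content(S,low+1,high)
--
-- def longest_gc_neutral2(S):
--     n = len(S) ; l = 0 ; L = []
--     for i in range(n-1):
--         for j in range(i+1,n):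
--             if j-i+1 >= l and gc_neutral2(S[i:j+1]):
--                 if j-i+1 == l: L.append(S[i:j+1])
--                 else:
--                     L = [S[i:j+1]]
--                     l = j-i+1
--     return L
-- ===== SOURCE B (Python) =====
-- def longest_gc_neutral2(S):
--     n = len(S)
--     p = [0]
--     acc = 0
--     for c in S:
--         acc += 1 if c in ('C', 'G') else -1
--         p.append(acc)
--     for m in range(n, 1, -1):
--         res = [S[i:i + m] for i in range(n - m + 1) if p[i] == p[i + m]]
--         if res:
--             return res
--     return []
-- ===== Notes on version B (the rewrite author's own statement) =====
-- stated objective: faster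
-- what changed: Replace the O(n^3) all-pairs scan with recursive GC recount per substring by one prefix-sum pass (+1 for C/G, -1 otherwise; a substring is neutral iff the prefix values at its ends are equal) followed by a descending sweep over lengths that returns the matches of the first (= longest) length that has any.
import Mathlib
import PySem

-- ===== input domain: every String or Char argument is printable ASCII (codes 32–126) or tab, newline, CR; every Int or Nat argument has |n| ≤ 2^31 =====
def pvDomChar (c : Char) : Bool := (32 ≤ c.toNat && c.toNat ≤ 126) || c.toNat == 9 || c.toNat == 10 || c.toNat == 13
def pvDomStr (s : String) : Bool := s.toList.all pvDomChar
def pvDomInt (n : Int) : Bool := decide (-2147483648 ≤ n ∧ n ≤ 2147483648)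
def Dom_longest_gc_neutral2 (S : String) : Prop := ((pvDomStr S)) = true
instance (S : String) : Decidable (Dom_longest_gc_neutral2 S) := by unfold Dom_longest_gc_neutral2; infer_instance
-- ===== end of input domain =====

-- B replaces A's cubic all-pairs rescan (a recursive GC recount per candidate substring) by one
-- prefix-sum pass (+1 for C/G, -1 otherwise; a substring is GC-neutral iff the prefix values at its
-- two ends are equal) and a descending sweep over lengths returning the matches of the first length
-- that has any (objective: faster).

-- ===== PORT A =====
def rec_gc_content (S : String) (low high : Int) : Int :=
  if low > high then 0
  else
    match PySem.Str.pyGet? S low with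
    | some c =>
      if c = 'C' ∨ c = 'G' then 1 + rec_gc_content S (low + 1) high
      else 0 + rec_gc_content S (low + 1) high
    | none => 0   -- unreachable in A's calls: every call keeps low in range (IndexError otherwise)
termination_by (high + 1 - low).toNat
decreasing_by all_goals omega

def gc_neutral2 (S : String) : Bool :=
  let n : Int := PySem.Str.len S
  if PySem.Int.mod n 2 ≠ 0 then false
  else rec_gc_content S 0 (n - 1) == PySem.Int.floordiv n 2

def longest_gc_neutral2 (S : String) : List String :=
  let n : Int := PySem.Str.len S
  let st :=
    (PySem.List.pyRange 0 (n - 1) 1).foldl (fun st i =>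
      (PySem.List.pyRange (i + 1) n 1).foldl (fun st j =>
        if j - i + 1 ≥ st.1 ∧ gc_neutral2 (PySem.Str.slice S (some i) (some (j + 1))) = true then
          if j - i + 1 = st.1 then (st.1, st.2 ++ [PySem.Str.slice S (some i) (some (j + 1))])
          else (j - i + 1, [PySem.Str.slice S (some i) (some (j + 1))])
        else st) st) ((0 : Int), ([] : List String))
  st.2

-- ===== PORT B =====
-- res = [S[i:i+m] for i in range(n-m+1) if p[i] == p[i+m]]
def gcRes (S : String) (p : List Int) (n m : Int) : List String :=
  ((PySem.List.pyRange 0 (n - m + 1) 1).filter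
      (fun i => PySem.List.pyGetD p i 0 == PySem.List.pyGetD p (i + m) 0)).map
    (fun i => PySem.Str.slice S (some i) (some (i + m)))

-- for m in range(n, 1, -1): if res: return res; (falling off the loop:) return []
def gcAltLoop (S : String) (p : List Int) (n : Int) : List Int → List String
  | [] => []
  | m :: ms => if gcRes S p n m ≠ [] then gcRes S p n m else gcAltLoop S p n ms

def longest_gc_neutral2_alt (S : String) : List String :=
  let n : Int := PySem.Str.len S
  let pa := S.toList.foldl
    (fun (pa : List Int × Int) c =>
      let acc := pa.2 + (if c = 'C' ∨ c = 'G' then 1 else -1)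
      (pa.1 ++ [acc], acc)) ([0], 0)
  gcAltLoop S pa.1 n (PySem.List.pyRange n 1 (-1))

-- ===== PRECONDITION & SPEC =====
def Spec_longest_gc_neutral2 (S : String) (out : List String) : Prop := out = longest_gc_neutral2_alt S
instance (S : String) (out : List String) : Decidable (Spec_longest_gc_neutral2 S out) := by unfold Spec_longest_gc_neutral2; infer_instance

-- ===== CLAIM (what is proved, stated in full; the proofs are below) =====
def Claim_equal_longest_gc_neutral2 : Prop := ∀ (S : String), Dom_longest_gc_neutral2 S → Spec_longest_gc_neutral2 S (longest_gc_neutral2 S)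

-- ===== LEMMAS AND PROOFS =====

-- weight of one character: +1 for C/G, -1 otherwise
def gcW (c : Char) : Int := if c = 'C' ∨ c = 'G' then 1 else -1
def gcPsum (l : List Char) : Int := (l.map gcW).sum
-- prefix sum of the weights of the first k characters
def gcP (cs : List Char) (k : Nat) : Int := gcPsum (cs.take k)
-- the pair list A traverses, lexicographically
def gcPairs (n : Int) : List (Int × Int) :=
  (PySem.List.pyRange 0 (n - 1) 1).flatMap (fun i => (PySem.List.pyRange (i + 1) n 1).map (fun j => (i, j)))
def gcQ (S : String) (x : Int × Int) : Bool :=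
  gc_neutral2 (PySem.Str.slice S (some x.1) (some (x.2 + 1)))
def gcKey (x : Int × Int) : Int := x.2 - x.1 + 1
def gcVal (S : String) (x : Int × Int) : String := PySem.Str.slice S (some x.1) (some (x.2 + 1))
def gcNL (S : String) : List (Int × Int) := (gcPairs ((S.toList.length : Int))).filter (gcQ S)
def gcM (S : String) : Int := (gcNL S).foldl (fun a x => max a (gcKey x)) 0
def gcPlist (S : String) : List Int :=
  (S.toList.foldl
    (fun (pa : List Int × Int) c =>
      let acc := pa.2 + (if c = 'C' ∨ c = 'G' then 1 else -1)
      (pa.1 ++ [acc], acc)) ([0], 0)).1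

lemma gcPsum_count (l : List Char) :
    gcPsum l = 2 * (l.countP (fun c => decide (c = 'C' ∨ c = 'G')) : Int) - l.length := by
  induction l with
  | nil => simp [gcPsum]
  | cons c t ih =>
    simp only [gcPsum, List.map_cons, List.sum_cons, List.countP_cons, List.length_cons] at *
    by_cases h : c = 'C' ∨ c = 'G' <;> simp [gcW, h, ih] <;> push_cast <;> ring

lemma gcPsum_take_sub (cs : List Char) (a b : Nat) (hab : a ≤ b) (hb : b ≤ cs.length) :
    gcPsum ((cs.drop a).take (b - a)) = gcP cs b - gcP cs a := by
  have h : cs.take b = cs.take a ++ (cs.drop a).take (b - a) := by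
    rw [← List.take_add]; congr 1; omega
  simp [gcP, h, gcPsum]

lemma rec_gc_drop (S : String) : ∀ (d k : Nat), S.toList.length ≤ k + d →
    rec_gc_content S (k : Int) ((S.toList.length : Int) - 1)
      = ((S.toList.drop k).countP (fun c => decide (c = 'C' ∨ c = 'G')) : Int) := by
  intro d
  induction d with
  | zero =>
    intro k hk
    rw [rec_gc_content, if_pos (by omega), List.drop_eq_nil_of_le (by omega)]
    simp
  | succ d ih =>
    intro k hk
    by_cases hkn : k < S.toList.length
    · rw [rec_gc_content, if_neg (by omega)]
      have hget : PySem.Str.pyGet? S (k : Int) = some (S.toList[k]'hkn) := by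
        simp [List.getElem?_eq_getElem hkn]
      simp only [hget]
      have hcast : (k : Int) + 1 = ((k + 1 : Nat) : Int) := by push_cast; ring
      have hdrop : S.toList.drop k = S.toList[k]'hkn :: S.toList.drop (k + 1) :=
        List.drop_eq_getElem_cons hkn
      rw [hcast, hdrop, List.countP_cons, ih (k+1) (by omega)]
      by_cases hc : S.toList[k]'hkn = 'C' ∨ S.toList[k]'hkn = 'G'
      · rw [if_pos hc]
        simp [hc]
        ring
      · rw [if_neg hc]
        simp [hc]
    · rw [rec_gc_content, if_pos (by omega), List.drop_eq_nil_of_le (by omega)]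
      simp

lemma gc_neutral2_eq (T : String) : gc_neutral2 T = decide (gcPsum T.toList = 0) := by
  have hrec := rec_gc_drop T T.toList.length 0 (by omega)
  simp only [Nat.cast_zero, List.drop_zero] at hrec
  have hcnt := gcPsum_count T.toList
  rw [gc_neutral2]
  simp only [PySem.Str.len_eq]
  set n : Int := (T.toList.length : Int) with hn
  have hmod : PySem.Int.mod n 2 = n % 2 := PySem.Int.mod_eq_emod_of_pos (by omega)
  have hdiv : PySem.Int.floordiv n 2 = n / 2 := PySem.Int.floordiv_eq_ediv_of_pos (by omega)
  rw [hmod, hdiv, hrec]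
  set c : Int := (T.toList.countP (fun c => decide (c = 'C' ∨ c = 'G')) : Int) with hc
  by_cases hm : n % 2 = 0
  · rw [if_neg (by omega)]
    have hb : (c == n / 2) = decide (c = n / 2) := by rfl
    rw [hb]
    rcases Decidable.em (c = n / 2) with h | h
    · simp only [h, decide_true]
      have : gcPsum T.toList = 0 := by omega
      simp [this]
    · simp only [decide_eq_false h]
      have : ¬ (gcPsum T.toList = 0) := by omega
      simp [this]
  · rw [if_pos (by omega)]
    have : ¬ (gcPsum T.toList = 0) := by omega
    simp [this]

lemma gcQ_eq (S : String) (i j : Int) (h0 : 0 ≤ i) (hij : i ≤ j) (hj : j + 1 ≤ (S.toList.length : Int)) :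
    gcQ S (i, j) = decide (gcP S.toList (j + 1).toNat = gcP S.toList i.toNat) := by
  rw [gcQ, gc_neutral2_eq]
  have htl : (PySem.Str.slice S (some i) (some (j + 1))).toList
      = (S.toList.drop i.toNat).take ((j + 1).toNat - i.toNat) := by
    rw [PySem.Str.toList_slice, PySem.Chars.slice_eq_listSlice, PySem.List.slice_toNat _ h0 (by omega)]
  rw [htl, gcPsum_take_sub S.toList i.toNat ((j+1).toNat) (by omega) (by omega)]
  rw [decide_eq_decide]
  omega

lemma gcfold_general (cs : List Char) : ∀ (l : List Int) (a : Int),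
    cs.foldl (fun (pa : List Int × Int) c =>
      let acc := pa.2 + (if c = 'C' ∨ c = 'G' then 1 else -1)
      (pa.1 ++ [acc], acc)) (l, a)
    = (l ++ (List.range cs.length).map (fun t => a + gcPsum (cs.take (t+1))), a + gcPsum cs) := by
  induction cs with
  | nil => intro l a; simp [gcPsum]
  | cons c cs ih =>
    intro l a
    rw [List.foldl_cons]
    show cs.foldl _ (l ++ [a + gcW c], a + gcW c) = _
    rw [ih (l ++ [a + gcW c]) (a + gcW c)]
    simp only [List.length_cons, List.range_succ_eq_map, List.map_cons, List.map_map,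
      Prod.mk.injEq]
    constructor
    · rw [List.append_assoc, List.singleton_append]
      have htail : List.map (fun t => a + gcW c + gcPsum (List.take (t + 1) cs)) (List.range cs.length)
          = List.map ((fun t => a + gcPsum (List.take (t + 1) (c :: cs))) ∘ Nat.succ) (List.range cs.length) := by
        apply List.map_congr_left
        intro t ht
        simp only [Function.comp_apply, List.take_succ_cons, gcPsum, List.map_cons, List.sum_cons, gcW]
        ring
      rw [htail]
      have hhead : a + gcW c = a + gcPsum (List.take (0+1) (c::cs)) := by simp [gcPsum, gcW]
      rw [hhead]
    · simp [gcPsum, gcW]; ring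

lemma gcPlist_eq (S : String) :
    gcPlist S = (List.range (S.toList.length + 1)).map (gcP S.toList) := by
  rw [gcPlist, gcfold_general]
  simp only [List.range_succ_eq_map, List.map_cons, List.map_map]
  rw [List.singleton_append]
  have htail : List.map (fun t => (0:Int) + gcPsum (List.take (t + 1) S.toList)) (List.range S.toList.length)
      = List.map (gcP S.toList ∘ Nat.succ) (List.range S.toList.length) := by
    apply List.map_congr_left
    intro t ht
    simp [gcP, gcPsum]
  rw [htail]
  rfl

lemma gcPlist_getD (S : String) (i : Int) (h0 : 0 ≤ i) (hn : i ≤ (S.toList.length : Int)) :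
    PySem.List.pyGetD (gcPlist S) i 0 = gcP S.toList i.toNat := by
  rw [gcPlist_eq]
  rw [PySem.List.pyGetD_eq_getElem _ _ h0 (by simp only [List.length_map, List.length_range]; push_cast; omega)]
  rw [List.getElem_map]
  congr 1
  simp [List.getElem_range]

lemma argmax_fold {α β : Type} (key : α → Int) (val : α → β) :
    ∀ (xs : List α) (l₀ : Int) (L₀ : List β),
      xs.foldl (fun st x => if key x ≥ st.1 then
          (if key x = st.1 then (st.1, st.2 ++ [val x]) else (key x, [val x])) else st) (l₀, L₀)
        = (xs.foldl (fun a x => max a (key x)) l₀,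
           (if xs.foldl (fun a x => max a (key x)) l₀ = l₀ then L₀ else []) ++
             ((xs.filter (fun x => decide (key x = xs.foldl (fun a x => max a (key x)) l₀))).map val)) := by
  intro xs
  induction xs with
  | nil => intro l₀ L₀; simp
  | cons x t ih =>
    intro l₀ L₀
    have hinit : ∀ (a : Int), a ≤ t.foldl (fun a x => max a (key x)) a :=
      fun a => (PySem.List.le_foldl_max_int t key a).1
    simp only [List.foldl_cons, List.filter_cons]
    rcases lt_trichotomy (key x) l₀ with hlt | heq | hgt
    · have hmax : max l₀ (key x) = l₀ := by omega
      simp only [hmax]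
      rw [if_neg (by simp; omega)]
      rw [ih l₀ L₀]
      have hM := hinit l₀
      have hkx : ¬ (key x = t.foldl (fun a x => max a (key x)) l₀) := by omega
      simp [hkx]
    · have hmax : max l₀ (key x) = l₀ := by omega
      simp only [hmax]
      rw [if_pos (by simp; omega), if_pos heq]
      rw [ih l₀ (L₀ ++ [val x])]
      have hM := hinit l₀
      by_cases hMt : t.foldl (fun a x => max a (key x)) l₀ = l₀
      · have hk : key x = t.foldl (fun a x => max a (key x)) l₀ := by omega
        simp [hMt, hk]
      · have hk : ¬ (key x = t.foldl (fun a x => max a (key x)) l₀) := by omega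
        simp [hMt, hk]
    · have hmax : max l₀ (key x) = key x := by omega
      simp only [hmax]
      rw [if_pos (by simp; omega), if_neg (by omega)]
      rw [ih (key x) [val x]]
      have hM := hinit (key x)
      have hMl : ¬ (t.foldl (fun a x => max a (key x)) (key x) = l₀) := by omega
      by_cases hk : key x = t.foldl (fun a x => max a (key x)) (key x)
      · have hMl' : ¬ (key x = l₀) := by omega
        simp [← hk, hMl']
      · have hk' : ¬ (t.foldl (fun a x => max a (key x)) (key x) = key x) := fun h => hk h.symm
        simp [hMl, hk, hk']

lemma filter_eq_single (l : List Int) (hl : l.Nodup) (c : Int) (r : Int → Bool) :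
    l.filter (fun j => decide (j = c) && r j) = if c ∈ l ∧ r c = true then [c] else [] := by
  induction l with
  | nil => simp
  | cons x t ih =>
    rcases List.nodup_cons.mp hl with ⟨hx, ht⟩
    by_cases hxc : x = c
    · subst hxc
      have hft : List.filter (fun j => decide (j = x) && r j) t = [] :=
        List.filter_eq_nil_iff.mpr (fun j hj => by
          have hne : j ≠ x := fun h => hx (h ▸ hj); simp [hne])
      by_cases hr : r x = true <;> simp [List.filter_cons, hr, hft, hx]
    · have hcx : ¬ c = x := fun h => hxc h.symm
      simp [List.filter_cons, hxc, ih ht, List.mem_cons, hcx]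

-- A's inner-loop body, on (i, j) pairs
def gcStep (S : String) : (Int × List String) → (Int × Int) → (Int × List String) := fun st x =>
  if gcKey x ≥ st.1 ∧ gcQ S x = true then
    (if gcKey x = st.1 then (st.1, st.2 ++ [gcVal S x]) else (gcKey x, [gcVal S x]))
  else st
lemma flatMap_ite {β : Type} (l : List Int) (c : Int → Prop) [DecidablePred c] (f : Int → β) :
    (l.flatMap (fun i => if c i then [f i] else [])) = (l.filter (fun i => decide (c i))).map f := by
  induction l with
  | nil => rfl
  | cons x t ih =>
    rw [List.flatMap_cons, List.filter_cons]
    by_cases hc : c x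
    · simp [hc, ih]
    · simp [hc, ih]

lemma flatMap_congr_mem {β : Type} (l : List Int) (f g : Int → List β) (h : ∀ x ∈ l, f x = g x) :
    l.flatMap f = l.flatMap g := by
  induction l with
  | nil => rfl
  | cons x t ih =>
    rw [List.flatMap_cons, List.flatMap_cons, h x List.mem_cons_self,
      ih (fun y hy => h y (List.mem_cons_of_mem _ hy))]

lemma gcStep_eq (S : String) :
    gcStep S = fun st x => if gcQ S x then
        (if gcKey x ≥ st.1 then
          (if gcKey x = st.1 then (st.1, st.2 ++ [gcVal S x]) else (gcKey x, [gcVal S x]))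
        else st)
      else st := by
  funext st x
  rw [gcStep]
  by_cases hq : gcQ S x = true
  · by_cases hk : gcKey x ≥ st.1
    · rw [if_pos ⟨hk, hq⟩, if_pos hq, if_pos hk]
    · rw [if_neg (fun h => hk h.1), if_pos hq, if_neg hk]
  · rw [if_neg (fun h => hq h.2), if_neg (by simpa using hq)]

lemma A_eq (S : String) :
    longest_gc_neutral2 S
      = ((gcNL S).filter (fun x => decide (gcKey x = gcM S))).map (gcVal S) := by
  rw [longest_gc_neutral2]
  simp only [PySem.Str.len_eq]
  set n : Int := (S.toList.length : Int) with hn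
  have h1 : (PySem.List.pyRange 0 (n - 1) 1).foldl (fun st i =>
      (PySem.List.pyRange (i + 1) n 1).foldl (fun st j =>
        if j - i + 1 ≥ st.1 ∧ gc_neutral2 (PySem.Str.slice S (some i) (some (j + 1))) = true then
          if j - i + 1 = st.1 then (st.1, st.2 ++ [PySem.Str.slice S (some i) (some (j + 1))])
          else (j - i + 1, [PySem.Str.slice S (some i) (some (j + 1))])
        else st) st) ((0 : Int), ([] : List String))
      = (gcPairs n).foldl (gcStep S) ((0 : Int), ([] : List String)) := by
    rw [gcPairs, List.foldl_flatMap]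
    apply PySem.List.foldl_congr_mem
    intro acc i hi
    rw [List.foldl_map]
    rfl
  rw [h1, gcStep_eq]
  rw [PySem.List.foldl_if_eq_foldl_filter]
  have h2 : (gcPairs n).filter (gcQ S) = gcNL S := rfl
  rw [h2]
  have h3 := argmax_fold gcKey (gcVal S) (gcNL S) 0 []
  rw [h3]
  have h4 : ((gcNL S).foldl (fun a x => max a (gcKey x)) 0) = gcM S := rfl
  rw [h4]
  simp

lemma mem_gcNL (S : String) (x : Int × Int) (hx : x ∈ gcNL S) :
    0 ≤ x.1 ∧ x.1 < x.2 ∧ x.2 < (S.toList.length : Int) ∧ gcQ S x = true := by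
  rw [gcNL, List.mem_filter] at hx
  obtain ⟨hp, hq⟩ := hx
  rw [gcPairs, List.mem_flatMap] at hp
  obtain ⟨i, hi, hx2⟩ := hp
  rw [List.mem_map] at hx2
  obtain ⟨j, hj, rfl⟩ := hx2
  rw [PySem.List.mem_pyRange_one] at hi hj
  exact ⟨hi.1, by omega, by omega, hq⟩

lemma gcKey_le_gcM (S : String) (x : Int × Int) (hx : x ∈ gcNL S) : gcKey x ≤ gcM S := by
  exact (PySem.List.le_foldl_max_int (gcNL S) gcKey 0).2 x hx

lemma res_empty (S : String) (m : Int) (hm2 : 2 ≤ m) (hgt : gcM S < m) :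
    gcRes S (gcPlist S) ((S.toList.length : Int)) m = [] := by
  rw [gcRes, List.map_eq_nil_iff, List.filter_eq_nil_iff]
  intro i hi
  rw [PySem.List.mem_pyRange_one] at hi
  intro hpred
  rw [gcPlist_getD S i hi.1 (by omega), gcPlist_getD S (i+m) (by omega) (by omega),
    beq_iff_eq] at hpred
  have hq : gcQ S (i, i + m - 1) = true := by
    rw [gcQ_eq S i (i + m - 1) hi.1 (by omega) (by omega)]
    have harg : i + m - 1 + 1 = i + m := by ring
    rw [harg, hpred]
    simp
  have hmem : (i, i + m - 1) ∈ gcNL S := by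
    rw [gcNL, List.mem_filter]
    refine ⟨?_, hq⟩
    rw [gcPairs, List.mem_flatMap]
    refine ⟨i, by rw [PySem.List.mem_pyRange_one]; omega, ?_⟩
    rw [List.mem_map]
    exact ⟨i + m - 1, by rw [PySem.List.mem_pyRange_one]; constructor <;> omega, rfl⟩
  have hle := gcKey_le_gcM S _ hmem
  rw [gcKey] at hle
  simp only at hle
  omega

lemma altLoop_all_empty (S : String) (p : List Int) (n : Int) (l : List Int)
    (h : ∀ m ∈ l, gcRes S p n m = []) : gcAltLoop S p n l = [] := by
  induction l with
  | nil => rfl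
  | cons m ms ih =>
    rw [gcAltLoop, if_neg (by simp [h m (List.mem_cons_self)])]
    exact ih (fun m' hm' => h m' (List.mem_cons_of_mem _ hm'))

lemma altLoop_append (S : String) (p : List Int) (n : Int) (l₁ l₂ : List Int)
    (h : ∀ m ∈ l₁, gcRes S p n m = []) : gcAltLoop S p n (l₁ ++ l₂) = gcAltLoop S p n l₂ := by
  induction l₁ with
  | nil => rfl
  | cons m ms ih =>
    rw [List.cons_append, gcAltLoop, if_neg (by simp [h m (List.mem_cons_self)])]
    exact ih (fun m' hm' => h m' (List.mem_cons_of_mem _ hm'))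

set_option maxHeartbeats 2000000 in
lemma res_M_eq (S : String) (h2 : 2 ≤ gcM S) (hn : gcM S ≤ (S.toList.length : Int)) :
    gcRes S (gcPlist S) ((S.toList.length : Int)) (gcM S)
      = ((gcNL S).filter (fun x => decide (gcKey x = gcM S))).map (gcVal S) := by
  set n : Int := (S.toList.length : Int) with hn
  set M : Int := gcM S with hM
  rw [gcNL, List.filter_filter, gcPairs]
  rw [List.filter_flatMap, List.map_flatMap]
  have hinner : ∀ i ∈ PySem.List.pyRange 0 (n - 1) 1,
      ((((PySem.List.pyRange (i + 1) n 1).map (fun j => (i, j))).filter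
          (fun x => decide (gcKey x = M) && gcQ S x)).map (gcVal S))
        = (if (i + M - 1 ∈ PySem.List.pyRange (i + 1) n 1 ∧ gcQ S (i, i + M - 1) = true)
            then [gcVal S (i, i + M - 1)] else []) := by
    intro i hi
    rw [List.filter_map]
    have hcong : ∀ j ∈ PySem.List.pyRange (i + 1) n 1,
        ((fun x => decide (gcKey x = M) && gcQ S x) ∘ (fun j => (i, j))) j
          = (fun j => decide (j = i + M - 1) && gcQ S (i, j)) j := by
      intro j hj
      simp only [Function.comp_apply, gcKey]
      congr 1
      rw [decide_eq_decide]
      omega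
    rw [List.filter_congr hcong]
    rw [filter_eq_single _ (PySem.List.nodup_pyRange_one _ _) (i + M - 1) (fun j => gcQ S (i, j))]
    by_cases hc : (i + M - 1 ∈ PySem.List.pyRange (i + 1) n 1 ∧ gcQ S (i, i + M - 1) = true)
    · rw [if_pos hc, if_pos hc]
      rfl
    · rw [if_neg hc, if_neg hc]
      rfl
  rw [flatMap_congr_mem _ _ _ hinner]
  rw [flatMap_ite _ (fun i => i + M - 1 ∈ PySem.List.pyRange (i + 1) n 1 ∧ gcQ S (i, i + M - 1) = true)
      (fun i => gcVal S (i, i + M - 1))]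
  rw [gcRes]
  have hsplit : PySem.List.pyRange 0 (n - 1) 1
      = PySem.List.pyRange 0 (n - M + 1) 1 ++ PySem.List.pyRange (n - M + 1) (n - 1) 1 :=
    PySem.List.pyRange_one_append 0 (n - M + 1) (n - 1) (by omega) (by omega)
  rw [hsplit, List.filter_append]
  have hnil : (PySem.List.pyRange (n - M + 1) (n - 1) 1).filter
      (fun i => decide (i + M - 1 ∈ PySem.List.pyRange (i + 1) n 1 ∧ gcQ S (i, i + M - 1) = true)) = [] := by
    apply List.filter_eq_nil_iff.mpr
    intro i hi
    rw [PySem.List.mem_pyRange_one] at hi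
    simp only [decide_eq_true_eq, not_and]
    intro hmem
    rw [PySem.List.mem_pyRange_one] at hmem
    omega
  rw [hnil, List.append_nil]
  have hval : (fun i => gcVal S (i, i + M - 1)) = (fun i : Int => PySem.Str.slice S (some i) (some (i + M))) := by
    funext i
    rw [gcVal]
    have harg : i + M - 1 + 1 = i + M := by ring
    simp only [harg]
  rw [hval]
  refine congrArg (List.map _) (List.filter_congr ?_)
  intro i hi
  rw [PySem.List.mem_pyRange_one] at hi
  rw [gcPlist_getD S i (by omega) (by omega), gcPlist_getD S (i + M) (by omega) (by omega)]
  apply Bool.eq_iff_iff.mpr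
  rw [beq_iff_eq, decide_eq_true_eq]
  have hQ : gcQ S (i, i + M - 1) = decide (gcP S.toList (i + M - 1 + 1).toNat = gcP S.toList i.toNat) :=
    gcQ_eq S i (i + M - 1) (by omega) (by omega) (by omega)
  have harg : i + M - 1 + 1 = i + M := by ring
  rw [harg] at hQ
  constructor
  · intro heq
    refine ⟨by rw [PySem.List.mem_pyRange_one]; omega, ?_⟩
    rw [hQ, decide_eq_true_eq]
    omega
  · intro ⟨hmem, hq⟩
    rw [hQ, decide_eq_true_eq] at hq
    omega

-- ===== VERDICT (by name: the statement is the Claim_ definition above) =====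
set_option maxHeartbeats 1000000 in
theorem longest_gc_neutral2_spec : Claim_equal_longest_gc_neutral2 := by
  intro S hdom
  unfold Spec_longest_gc_neutral2
  have halt : longest_gc_neutral2_alt S
      = gcAltLoop S (gcPlist S) ((S.toList.length : Int))
          (PySem.List.pyRange ((S.toList.length : Int)) 1 (-1)) := by
    rw [longest_gc_neutral2_alt]
    simp only [PySem.Str.len_eq]
    rfl
  rw [A_eq, halt]
  set n : Int := (S.toList.length : Int) with hn
  by_cases hNL : gcNL S = []
  · rw [hNL]
    simp only [List.filter_nil, List.map_nil]
    refine (altLoop_all_empty S (gcPlist S) n _ ?_).symm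
    intro m hm
    rw [PySem.List.mem_pyRange_neg_one] at hm
    have hM0 : gcM S = 0 := by rw [gcM, hNL]; rfl
    exact res_empty S m (by omega) (by omega)
  · have hfold : gcM S = ((gcNL S).map gcKey).foldl max 0 := by rw [gcM, List.foldl_map]
    obtain ⟨y, hy⟩ := List.exists_mem_of_ne_nil (gcNL S) hNL
    have hby := mem_gcNL S y hy
    have hy2 : 2 ≤ gcKey y := by rw [gcKey]; omega
    have hyM : gcKey y ≤ gcM S := gcKey_le_gcM S y hy
    have hM2 : 2 ≤ gcM S := by omega
    obtain ⟨x, hx, hkx⟩ : ∃ x ∈ gcNL S, gcKey x = gcM S := by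
      rcases PySem.List.foldl_max_mem ((gcNL S).map gcKey) 0 with h | h
      · rw [← hfold] at h; omega
      · rw [← hfold] at h
        obtain ⟨x, hx, hxe⟩ := List.mem_map.mp h
        exact ⟨x, hx, hxe⟩
    have hbx := mem_gcNL S x hx
    have hMn : gcM S ≤ n := by rw [← hkx, gcKey]; omega
    have hsplit : PySem.List.pyRange n 1 (-1)
        = (PySem.List.pyRange (gcM S + 1) (n + 1) 1).reverse
            ++ (gcM S :: (PySem.List.pyRange 2 (gcM S) 1).reverse) := by
      rw [PySem.List.pyRange_neg_one_eq_reverse]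
      have h12 : (1 : Int) + 1 = 2 := by norm_num
      rw [h12]
      rw [PySem.List.pyRange_one_append 2 (gcM S) (n + 1) (by omega) (by omega)]
      rw [PySem.List.pyRange_one_append (gcM S) (gcM S + 1) (n + 1) (by omega) (by omega)]
      rw [PySem.List.pyRange_one_singleton]
      simp [List.reverse_append]
    rw [hsplit]
    have hemp : ∀ m ∈ (PySem.List.pyRange (gcM S + 1) (n + 1) 1).reverse,
        gcRes S (gcPlist S) n m = [] := by
      intro m hm
      rw [List.mem_reverse, PySem.List.mem_pyRange_one] at hm
      exact res_empty S m (by omega) (by omega)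
    rw [altLoop_append S (gcPlist S) n _ _ hemp]
    rw [gcAltLoop]
    have hres := res_M_eq S hM2 hMn
    have hne : gcRes S (gcPlist S) n (gcM S) ≠ [] := by
      rw [hres]
      apply List.ne_nil_of_mem
      exact List.mem_map_of_mem (List.mem_filter.mpr ⟨hx, by simp [hkx]⟩)
    rw [if_pos hne, hres]
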